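-- pv_equiv track=rewrite | github.com/tobardaniel/Practicas | h4.py | simple_sum
-- ===== SOURCE A (Python) =====
-- primos = [2, 3, 5, 7, 11, 13, 17, 19, 23, 29, 31, 37, 41, 43, 47, 53, 59, 61, 67, 71, 73, 79, 83, 89, 97, 101, 103, 107, 109, 113, 127, 131, 137, 139, 149, 151, 157, 163, 167, 173, 179, 181, 191, 193, 197, 199, 211, 223, 227, 229, 233, 239, 241, 251, 257, 263, 269, 271, 277, 281, 283, 293, 307, 311, 313, 317, 331, 337, 347, 349, 353, 359, 367, 373, 379, 383, 389, 397, 401, 409, 419, 421, 431, 433, 439, 443]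
--
-- def f_primo(numero):
--     prim = True
--     for k in primos:
--         if numero % k == 0:
--             prim = False
--             break
--     return prim
--
-- def simple_sum(numero, mod):
--     sumas = 0
--     modulo_primo = f_primo(mod)
--     if modulo_primo:
--         veces = mod * (mod - 1)
--         repeticiones = numero // veces
--         resto = numero % veces
--         phi = mod - 1
--         if numero <= veces or True:
--             for j in range(1, numero + 1):
--                 sumas += pow(j, j % phi, mod)
--         else:
--             for j in range(1, veces + 1):
--                 sumas += repeticiones * pow(j, j % phi, mod)
--             for j in range(1, resto + 1):
--                 sumas += pow(j, j % phi, mod)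
--     return sumas % mod
-- ===== SOURCE B (Python) =====
-- primos = [2, 3, 5, 7, 11, 13, 17, 19, 23, 29, 31, 37, 41, 43, 47, 53, 59, 61, 67, 71, 73, 79, 83, 89, 97, 101, 103, 107, 109, 113, 127, 131, 137, 139, 149, 151, 157, 163, 167, 173, 179, 181, 191, 193, 197, 199, 211, 223, 227, 229, 233, 239, 241, 251, 257, 263, 269, 271, 277, 281, 283, 293, 307, 311, 313, 317, 331, 337, 347, 349, 353, 359, 367, 373, 379, 383, 389, 397, 401, 409, 419, 421, 431, 433, 439, 443]
--
--
-- def simple_sum(numero, mod):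
--     # mod divisible by one of the tabulated primes: the sum is never taken, answer is 0
--     if any(mod % k == 0 for k in primos):
--         return 0
--     phi = mod - 1
--     period = mod * phi
--     # each term pow(j, j % phi, mod) depends only on (j % mod, j % phi),
--     # hence is periodic in j with period lcm(mod, phi) = mod * phi
--     n = max(numero, 0)
--     q, r = divmod(n, period)
--     full = sum(pow(j, j % phi, mod) for j in range(1, period + 1)) if q > 0 else 0
--     part = sum(pow(j, j % phi, mod) for j in range(1, r + 1))
--     return (q * full + part) % mod
-- ===== Notes on version B (the rewrite author's own statement) =====
-- stated objective: faster
-- what changed: B sums one full period mod*(mod-1) of the periodic term pow(j, j % (mod-1), mod) and multiplies by the number of full periods, instead of A's loop over every j in 1..numero.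
-- outside the precondition, e.g. on simple_sum(5, -449): A returns -303, B returns -303; on simple_sum(500, -449): A raises ValueError, B raises ValueError
import Mathlib
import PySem

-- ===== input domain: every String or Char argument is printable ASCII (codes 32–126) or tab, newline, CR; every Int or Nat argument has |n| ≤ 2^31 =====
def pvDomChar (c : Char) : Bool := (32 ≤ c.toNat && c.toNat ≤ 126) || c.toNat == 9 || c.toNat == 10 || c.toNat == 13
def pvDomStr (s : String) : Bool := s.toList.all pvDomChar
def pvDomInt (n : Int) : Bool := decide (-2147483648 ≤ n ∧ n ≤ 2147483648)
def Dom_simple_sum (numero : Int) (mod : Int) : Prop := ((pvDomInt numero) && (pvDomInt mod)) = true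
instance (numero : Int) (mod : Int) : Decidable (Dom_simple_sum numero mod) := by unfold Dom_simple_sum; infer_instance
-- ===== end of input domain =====

-- B replaces A's term-by-term loop over 1..numero by summing one period mod*(mod-1) of the
-- periodic term pow(j, j % (mod-1), mod) and multiplying by the number of full periods
-- (objective: faster once numero exceeds the period mod*(mod-1); otherwise the same loop length).

-- ===== PORT A =====
def primos : List Int := [2, 3, 5, 7, 11, 13, 17, 19, 23, 29, 31, 37, 41, 43, 47, 53, 59, 61, 67, 71, 73, 79, 83, 89, 97, 101, 103, 107, 109, 113, 127, 131, 137, 139, 149, 151, 157, 163, 167, 173, 179, 181, 191, 193, 197, 199, 211, 223, 227, 229, 233, 239, 241, 251, 257, 263, 269, 271, 277, 281, 283, 293, 307, 311, 313, 317, 331, 337, 347, 349, 353, 359, 367, 373, 379, 383, 389, 397, 401, 409, 419, 421, 431, 433, 439, 443]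

-- 'for k in primos: if numero % k == 0: prim = False; break' as structural recursion
def fPrimoLoop (l : List Int) (numero : Int) : Bool :=
  match l with
  | [] => true
  | k :: ks => if PySem.Int.mod numero k == 0 then false else fPrimoLoop ks numero

def f_primo (numero : Int) : Bool := fPrimoLoop primos numero

-- pow(j, j % phi, mod) is PySem.Int.powMod with a Nat exponent: exact here because on Pre_
-- the prime branch is only reached with mod ≥ 2, so j % phi ∈ [0, phi) and .toNat is the identity.
def simple_sum (numero : Int) (mod : Int) : Int :=
  let sumas : Int := 0
  let modulo_primo := f_primo mod
  let sumas :=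
    if modulo_primo then
      let veces := mod * (mod - 1)
      -- A computes these two before its loop; they are unused in the branch it always takes
      -- (its '… or True'); they raise only when veces = 0, i.e. mod = 1, which Pre_ excludes.
      let _repeticiones := PySem.Int.floordiv numero veces
      let _resto := PySem.Int.mod numero veces
      let phi := mod - 1
      (PySem.List.pyRange 1 (numero + 1) 1).foldl
        (fun s j => s + PySem.Int.powMod j (PySem.Int.mod j phi).toNat mod) sumas
    else sumas
  PySem.Int.mod sumas mod

-- ===== PORT B =====
def simple_sum_alt (numero : Int) (mod : Int) : Int :=
  if primos.any (fun k => PySem.Int.mod mod k == 0) then 0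
  else
    let phi := mod - 1
    let period := mod * phi
    let n := max numero 0
    let q := PySem.Int.floordiv n period
    let r := PySem.Int.mod n period
    let full := if q > 0 then
        (PySem.List.pyRange 1 (period + 1) 1).foldl
          (fun s j => s + PySem.Int.powMod j (PySem.Int.mod j phi).toNat mod) 0
      else 0
    let part := (PySem.List.pyRange 1 (r + 1) 1).foldl
        (fun s j => s + PySem.Int.powMod j (PySem.Int.mod j phi).toNat mod) 0
    PySem.Int.mod (q * full + part) mod

-- ===== PRECONDITION & SPEC =====
-- Pre_ excludes mod = 0 and mod = 1, where A raises ZeroDivisionError, and negative mod coprime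
-- to the table's primes with numero ≥ 1, where A raises ValueError as soon as j reaches a prime
-- factor of |mod| and where, for smaller numero, both programs' value comes from Python's
-- negative-exponent modular-inverse pow, which is outside the ported domain.
def Pre_simple_sum (numero : Int) (mod : Int) : Prop :=
  2 ≤ mod ∨ (mod < 0 ∧ (numero ≤ 0 ∨ ∃ k ∈ primos, PySem.Int.mod mod k = 0))
instance (numero : Int) (mod : Int) : Decidable (Pre_simple_sum numero mod) := by
  unfold Pre_simple_sum; infer_instance
def pvWitness_simple_sum : Int × Int := (10, 7)

def Spec_simple_sum (numero : Int) (mod : Int) (out : Int) : Prop := out = simple_sum_alt numero mod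
instance (numero : Int) (mod : Int) (out : Int) : Decidable (Spec_simple_sum numero mod out) := by
  unfold Spec_simple_sum; infer_instance

-- ===== CLAIM (what is proved, stated in full; the proofs are below) =====
def Claim_equal_simple_sum : Prop := ∀ (numero : Int) (mod : Int), Dom_simple_sum numero mod → Pre_simple_sum numero mod → Spec_simple_sum numero mod (simple_sum numero mod)

-- ===== LEMMAS AND PROOFS =====

-- the summed term, and the sum of its first k values (j = 1 .. k)
def pvT (m j : Int) : Int := PySem.Int.powMod j (PySem.Int.mod j (m - 1)).toNat m
def pvS (m : Int) (k : Nat) : Int := ((List.range k).map (fun (i : Nat) => pvT m (1 + (i : Int)))).sum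

lemma fPrimoLoop_eq_not_any (l : List Int) (n : Int) :
    fPrimoLoop l n = !(l.any (fun k => PySem.Int.mod n k == 0)) := by
  induction l with
  | nil => rfl
  | cons k ks ih => by_cases h : PySem.Int.mod n k == 0 <;> simp [fPrimoLoop, h, ih]

lemma foldl_term_eq_pvS (m : Int) (x : Int) :
    (PySem.List.pyRange 1 (x + 1) 1).foldl
      (fun s j => s + PySem.Int.powMod j (PySem.Int.mod j (m - 1)).toNat m) 0
    = pvS m x.toNat := by
  rw [PySem.List.foldl_add, PySem.List.pyRange_one]
  simp only [pvS, pvT, List.map_map, Function.comp_def]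
  have h : (x + 1 - 1).toNat = x.toNat := by omega
  rw [h, zero_add]

-- periodicity of the term: the exponent j % (m-1) has period m-1, the base has period m
lemma pvT_period (m j : Int) (hm : 2 ≤ m) : pvT m (j + m * (m - 1)) = pvT m j := by
  have hphi : (0 : Int) < m - 1 := by omega
  have hmpos : (0 : Int) < m := by omega
  have hexp : PySem.Int.mod (j + m * (m - 1)) (m - 1) = PySem.Int.mod j (m - 1) := by
    rw [PySem.Int.mod_eq_emod_of_pos hphi, PySem.Int.mod_eq_emod_of_pos hphi, mul_comm,
      Int.add_mul_emod_self_left]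
  unfold pvT
  rw [hexp, PySem.Int.powMod_eq_emod _ _ hmpos, PySem.Int.powMod_eq_emod _ _ hmpos]
  exact Int.ModEq.pow _ (Int.add_mul_emod_self_left j m (m - 1))

lemma pv_period_nonneg (m : Int) (hm : 2 ≤ m) : (0 : Int) ≤ m * (m - 1) := by nlinarith

lemma pvS_add_period (m : Int) (hm : 2 ≤ m) (k : Nat) :
    pvS m ((m * (m - 1)).toNat + k) = pvS m (m * (m - 1)).toNat + pvS m k := by
  have hP : (((m * (m - 1)).toNat : Nat) : Int) = m * (m - 1) :=
    Int.toNat_of_nonneg (pv_period_nonneg m hm)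
  unfold pvS
  rw [List.range_add, List.map_append, List.sum_append, List.map_map]
  congr 1
  refine congrArg List.sum (List.map_congr_left ?_)
  intro i _
  have h : (1 : Int) + (((m * (m - 1)).toNat + i : Nat) : Int) = (1 + (i : Int)) + m * (m - 1) := by
    push_cast [hP]; ring
  simp only [Function.comp_def, h, pvT_period m _ hm]

lemma pvS_blocks (m : Int) (hm : 2 ≤ m) (q r : Nat) :
    pvS m (q * (m * (m - 1)).toNat + r) = (q : Int) * pvS m (m * (m - 1)).toNat + pvS m r := by
  induction q with
  | zero => simp
  | succ q ih =>
    have h : (q + 1) * (m * (m - 1)).toNat + r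
        = (m * (m - 1)).toNat + (q * (m * (m - 1)).toNat + r) := by ring
    rw [h, pvS_add_period m hm, ih]
    push_cast; ring

-- ===== VERDICT (by name: the statement is the Claim_ definition above) =====
theorem simple_sum_spec : Claim_equal_simple_sum := by
  intro numero mod hdom hpre
  unfold Spec_simple_sum simple_sum simple_sum_alt
  by_cases hp : primos.any (fun k => PySem.Int.mod mod k == 0)
  · have hf : f_primo mod = false := by
      rw [f_primo, fPrimoLoop_eq_not_any, hp]; rfl
    have hz : PySem.Int.mod 0 mod = 0 := by simp [PySem.Int.mod]
    simp [hf, hp, hz]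
  · have hf : f_primo mod = true := by
      rw [f_primo, fPrimoLoop_eq_not_any, Bool.eq_false_iff.mpr hp]; rfl
    have hp' : primos.any (fun k => PySem.Int.mod mod k == 0) = false := Bool.eq_false_iff.mpr hp
    have hz : PySem.Int.mod 0 mod = 0 := by simp [PySem.Int.mod]
    have hm : (mod < 0 ∧ numero ≤ 0) ∨ 2 ≤ mod := by
      rcases hpre with h | ⟨hneg, hnum | ⟨k, hk, hmod⟩⟩
      · exact Or.inr h
      · exact Or.inl ⟨hneg, hnum⟩
      · exact absurd (List.any_eq_true.mpr ⟨k, hk, by simp [hmod]⟩) hp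
    rcases hm with ⟨hneg, hnum⟩ | hm
    · -- mod < 0 and numero ≤ 0: A's loop is empty and B's n is 0; both sides are 0 % mod = 0
      have hPpos : (0 : Int) < mod * (mod - 1) := by nlinarith
      have hmax : max numero 0 = 0 := max_eq_right hnum
      rw [PySem.List.pyRange_one_eq_nil (by omega : numero + 1 ≤ 1)]
      simp only [hf, if_true, hp', Bool.false_eq_true, if_false, hmax, List.foldl_nil,
        PySem.Int.floordiv_eq_ediv_of_pos hPpos, PySem.Int.mod_eq_emod_of_pos hPpos,
        Int.zero_ediv, Int.zero_emod]
      rw [PySem.List.pyRange_one_eq_nil (by omega : (0 : Int) + 1 ≤ 1)]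
      simp [hz]
    have hPpos : (0 : Int) < mod * (mod - 1) := by nlinarith
    have hn : (0 : Int) ≤ max numero 0 := le_max_right _ _
    -- A's loop runs over 1..numero, i.e. over 1..max numero 0
    have hrange : PySem.List.pyRange 1 (numero + 1) 1
        = PySem.List.pyRange 1 (max numero 0 + 1) 1 := by
      by_cases h : 0 ≤ numero
      · rw [max_eq_left h]
      · rw [PySem.List.pyRange_one_eq_nil (by omega),
          PySem.List.pyRange_one_eq_nil (by omega : max numero 0 + 1 ≤ 1)]
    have hcastn : ((max numero 0).toNat : Int) = max numero 0 := Int.toNat_of_nonneg hn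
    have hcastP : (((mod * (mod - 1)).toNat : Nat) : Int) = mod * (mod - 1) :=
      Int.toNat_of_nonneg (le_of_lt hPpos)
    set N := (max numero 0).toNat with hN
    set Pn := (mod * (mod - 1)).toNat with hPn
    set qn := N / Pn with hqn
    set rn := N % Pn with hrn
    -- the Int quotient/remainder B takes are the Nat ones on n.toNat
    have hq : PySem.Int.floordiv (max numero 0) (mod * (mod - 1)) = ((qn : Nat) : Int) := by
      rw [PySem.Int.floordiv_eq_ediv_of_pos hPpos, hqn, Int.natCast_ediv, hcastn, hcastP]
    have hr : PySem.Int.mod (max numero 0) (mod * (mod - 1)) = ((rn : Nat) : Int) := by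
      rw [PySem.Int.mod_eq_emod_of_pos hPpos, hrn, Int.natCast_emod, hcastn, hcastP]
    have hNsplit := Nat.div_add_mod N Pn
    have hNeq : N = qn * Pn + rn := by rw [Nat.mul_comm]; exact hNsplit.symm
    -- A's whole sum, split into qn full periods plus a remainder prefix
    have hA : (PySem.List.pyRange 1 (numero + 1) 1).foldl
        (fun s j => s + PySem.Int.powMod j (PySem.Int.mod j (mod - 1)).toNat mod) 0
        = (qn : Int) * pvS mod Pn + pvS mod rn := by
      rw [hrange, foldl_term_eq_pvS, ← hN, hNeq, hPn, pvS_blocks mod hm]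
    have hfull : (PySem.List.pyRange 1 (mod * (mod - 1) + 1) 1).foldl
        (fun s j => s + PySem.Int.powMod j (PySem.Int.mod j (mod - 1)).toNat mod) 0
        = pvS mod Pn := by
      rw [foldl_term_eq_pvS, hPn]
    have hpart : (PySem.List.pyRange 1 (((rn : Nat) : Int) + 1) 1).foldl
        (fun s j => s + PySem.Int.powMod j (PySem.Int.mod j (mod - 1)).toNat mod) 0
        = pvS mod rn := by
      rw [foldl_term_eq_pvS, Int.toNat_natCast]
    simp only [hf, if_true, hp', Bool.false_eq_true, if_false, hq, hr, hA, hfull, hpart]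
    by_cases hq0 : qn = 0
    · simp [hq0]
    · rw [if_pos (by exact_mod_cast Nat.pos_of_ne_zero hq0)]
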